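/- GENERATED by tools/from_farm_form.py from farm/worked/abs/Proof.lean (a worked proof of the farm's unit `abs`,
   accepted by the verdict) — do not edit. -/
import ProgX.Base.Spec.Units.abs

open X86 X86.User Asan ProgX.Base

set_option maxRecDepth 4000
set_option maxHeartbeats 4000000

theorem ProgX.Base.Spec.Proved.abs_ok : ProgX.Base.Spec.abs.Statement := by
  intro Lay hLay μ hμ u₀ hcode others frames u ret he hpre
  v_entry he
  u_walk hcode [hμ.vendor] span [ProgX.Base.L.textLo, ProgX.Base.L.textHi] side (v_side)
  · -- x < 0: `neg eax`
    refine ReachVia.done ?_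
    v_returned
    refine ⟨?_, by rw [w_mem]; exact Mem.EqOn.refl _ _ _⟩
    rw [w_rax, toNat_ofBV32, BitVec.toNat_neg, toNat_part32]
    rw [BitVec.msb_eq_decide, toNat_part32] at hbr_1016e4
    simp only [decide_eq_true_eq] at hbr_1016e4
    have hlt : (u.reg .rdi).toNat % 2 ^ 32 < 2 ^ 32 := Nat.mod_lt _ (by decide)
    rw [if_neg (by omega)]
    omega
  · -- x ≥ 0
    refine ReachVia.done ?_
    v_returned
    refine ⟨?_, by rw [w_mem]; exact Mem.EqOn.refl _ _ _⟩
    rw [w_rax, toNat_ofBV32, toNat_part32]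
    rw [BitVec.msb_eq_decide, toNat_part32] at hbr_1016e4
    simp only [decide_eq_false_iff_not] at hbr_1016e4
    rw [if_pos (by omega)]
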